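-- pv_equiv track=rewrite | github.com/stefanlxnru-coder/imgsage5 | ImageSEOStream/image_processor.py | _remove_repetition
-- ===== SOURCE A (Python) =====
-- def _remove_repetition(description):
--     """Remove repetitive words and phrases from description"""
--     if not description:
--         return description
--
--     words = description.split()
--
--     # Remove consecutive duplicate words
--     cleaned_words = []
--     for i, word in enumerate(words):
--         if i == 0 or word.lower() != words[i-1].lower():
--             cleaned_words.append(word)
--
--     # Remove words that appear too frequently (more than 2 times)
--     word_count = {}
--     for word in cleaned_words:
--         word_lower = word.lower()
--         if len(word_lower) > 3:  # Only check words longer than 3 characters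
--             word_count[word_lower] = word_count.get(word_lower, 0) + 1
--
--     # Filter out words that appear more than twice
--     final_words = []
--     word_usage = {}
--     for word in cleaned_words:
--         word_lower = word.lower()
--         if len(word_lower) <= 3:  # Keep short words (articles, prepositions)
--             final_words.append(word)
--         else:
--             current_usage = word_usage.get(word_lower, 0)
--             if current_usage < 2:  # Allow each word maximum 2 times
--                 final_words.append(word)
--                 word_usage[word_lower] = current_usage + 1
--
--     return ' '.join(final_words)
-- ===== SOURCE B (Python) =====
-- def _remove_repetition(description):
--     """Remove repetitive words and phrases from description"""
--     if not description:
--         return description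
--
--     final_words = []
--     usage = {}
--     prev_lower = None
--     for word in description.split():
--         word_lower = word.lower()
--         if word_lower != prev_lower:
--             if len(word_lower) <= 3:
--                 final_words.append(word)
--             else:
--                 u = usage.get(word_lower, 0)
--                 if u < 2:
--                     final_words.append(word)
--                     usage[word_lower] = u + 1
--         prev_lower = word_lower
--
--     return ' '.join(final_words)
-- ===== Notes on version B (the rewrite author's own statement) =====
-- stated objective: simpler
-- what changed: B replaces A's three passes (build a deduped list, build a never-read word_count dict, then filter with a usage dict) by one fused pass carrying the previous word's lowercase and the usage dict, with no intermediate list and no dead dict.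
import Mathlib
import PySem

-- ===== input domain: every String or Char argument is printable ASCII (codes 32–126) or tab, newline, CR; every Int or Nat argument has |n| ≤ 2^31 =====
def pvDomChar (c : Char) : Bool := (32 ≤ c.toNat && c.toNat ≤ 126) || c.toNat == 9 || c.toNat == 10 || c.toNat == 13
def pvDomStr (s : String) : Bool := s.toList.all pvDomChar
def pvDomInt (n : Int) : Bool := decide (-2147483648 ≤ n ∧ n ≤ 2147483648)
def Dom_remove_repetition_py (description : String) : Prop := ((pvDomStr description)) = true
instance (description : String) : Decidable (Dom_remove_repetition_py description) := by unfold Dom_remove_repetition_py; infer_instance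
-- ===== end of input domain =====

-- B fuses A's three passes (dedup list, dead count dict, usage filter) into one loop
-- carrying prev-lowered-word and the usage dict; objective: simpler (one pass, no
-- intermediate list, no dead dict). Return value only; no mutation involved.

-- ===== PORT A =====
def remove_repetition_py (description : String) : String :=
  if description == "" then description
  else
    let words := PySem.Str.split₀ description
    -- for i, word in enumerate(words): keep if i == 0 or word.lower() != words[i-1].lower()
    -- (pyGetD with default "" is only evaluated when i ≥ 1, where Python's words[i-1] is in range)
    let cleaned_words := (PySem.List.enumerate words).foldl
      (fun acc (p : Int × String) =>
        if p.1 == 0 || PySem.Str.lower p.2 != PySem.Str.lower (PySem.List.pyGetD words (p.1 - 1) "")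
        then acc ++ [p.2] else acc) []
    -- word_count dict (computed by A, never read afterwards)
    let _word_count := cleaned_words.foldl
      (fun (d : PySem.Dict String Int) w =>
        let wl := PySem.Str.lower w
        if 3 < PySem.Str.len wl then d.insert wl (d.getD wl 0 + 1) else d)
      PySem.Dict.empty
    let final := cleaned_words.foldl
      (fun (st : List String × PySem.Dict String Int) w =>
        let wl := PySem.Str.lower w
        if PySem.Str.len wl ≤ 3 then (st.1 ++ [w], st.2)
        else
          let cu := st.2.getD wl 0
          if cu < 2 then (st.1 ++ [w], st.2.insert wl (cu + 1)) else st)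
      ([], PySem.Dict.empty)
    PySem.Str.join " " final.1

-- ===== PORT B =====
def remove_repetition_py_alt (description : String) : String :=
  if description == "" then description
  else
    let st := (PySem.Str.split₀ description).foldl
      (fun (st : List String × PySem.Dict String Int × Option String) word =>
        let wl := PySem.Str.lower word
        -- word_lower != prev_lower (prev_lower is None before the first word)
        if some wl != st.2.2 then
          if PySem.Str.len wl ≤ 3 then (st.1 ++ [word], st.2.1, some wl)
          else
            let u := st.2.1.getD wl 0
            if u < 2 then (st.1 ++ [word], st.2.1.insert wl (u + 1), some wl)
            else (st.1, st.2.1, some wl)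
        else (st.1, st.2.1, some wl))
      ([], PySem.Dict.empty, none)
    PySem.Str.join " " st.1

-- ===== PRECONDITION & SPEC =====
def Spec_remove_repetition_py (description : String) (out : String) : Prop := out = remove_repetition_py_alt description
instance (description : String) (out : String) : Decidable (Spec_remove_repetition_py description out) := by unfold Spec_remove_repetition_py; infer_instance

-- ===== CLAIM (what is proved, stated in full; the proofs are below) =====
def Claim_equal_remove_repetition_py : Prop := ∀ (description : String), Dom_remove_repetition_py description → Spec_remove_repetition_py description (remove_repetition_py description)

-- ===== LEMMAS AND PROOFS =====

-- consecutive-dedup of A's first loop, carried as "lowercase of the previous original word"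
def pvDedup (p : Option String) : List String → List String
  | [] => []
  | w :: ws =>
    let wl := PySem.Str.lower w
    if some wl ≠ p then w :: pvDedup (some wl) ws else pvDedup (some wl) ws

def pvLastLow (p : Option String) : List String → Option String
  | [] => p
  | w :: ws => pvLastLow (some (PySem.Str.lower w)) ws

-- A's enumerate/index loop computes pvDedup
theorem pvEnumFold (words : List String) :
  ∀ (tail : List String) (k : Nat) (acc : List String),
    words.drop k = tail →
    (PySem.List.enumerate tail (k : Int)).foldl
      (fun acc (p : Int × String) =>
        if p.1 == 0 || PySem.Str.lower p.2 != PySem.Str.lower (PySem.List.pyGetD words (p.1 - 1) "")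
        then acc ++ [p.2] else acc) acc
    = acc ++ pvDedup (if k = 0 then none else some (PySem.Str.lower (words.getD (k-1) ""))) tail := by
  intro tail
  induction tail with
  | nil => intro k acc _; simp [PySem.List.enumerate, pvDedup]
  | cons w ws ih =>
    intro k acc hdrop
    have hk : words.getD k "" = w := by
      have h0 := congrArg (fun l => l[0]?) hdrop
      simp at h0
      simp [List.getD, h0]
    have hdrop1 : words.drop (k+1) = ws := by
      have := congrArg (List.drop 1) hdrop
      simpa [List.drop_drop, Nat.add_comm] using this
    rw [PySem.List.enumerate_cons]
    simp only [List.foldl_cons]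
    match k with
    | 0 =>
      have hc : (((0:Nat) : Int) == 0 || PySem.Str.lower w != PySem.Str.lower (PySem.List.pyGetD words (((0:Nat) : Int) - 1) "")) = true := by
        simp
      rw [hc, if_pos rfl]
      have hcast : (((0:Nat) : Int) + 1) = ((1 : Nat) : Int) := by norm_num
      rw [hcast, ih 1 (acc ++ [w]) hdrop1]
      simp only [List.getD] at hk
      simp [pvDedup, hk]
    | k + 1 =>
      have hprev : PySem.List.pyGetD words ((((k+1 : Nat)) : Int) - 1) "" = words.getD k "" := by
        have : ((((k+1 : Nat)) : Int) - 1) = ((k : Nat) : Int) := by push_cast; ring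
        rw [this, PySem.List.pyGetD_natCast]
      have hne : ((((k+1 : Nat)) : Int) == 0) = false := by
        simp
        omega
      have hcast : ((((k+1 : Nat)) : Int) + 1) = ((k + 2 : Nat) : Int) := by push_cast; ring
      rw [hprev, hne, Bool.false_or, hcast]
      by_cases heq : PySem.Str.lower w = PySem.Str.lower (words.getD k "")
      · rw [heq, bne_self_eq_false, if_neg (by simp)]
        rw [ih (k+2) acc (by simpa using hdrop1)]
        simp only [List.getD] at hk heq
        simp [pvDedup, heq, hk]
      · have : (PySem.Str.lower w != PySem.Str.lower (words.getD k "")) = true := by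
          simpa using heq
        rw [this, if_pos rfl]
        rw [ih (k+2) (acc ++ [w]) (by simpa using hdrop1)]
        simp only [List.getD] at hk heq
        simp [pvDedup, heq, hk]

-- B's fused loop = A's filter loop run on pvDedup
theorem pvFuse :
  ∀ (ws : List String) (prev : Option String) (out : List String) (usage : PySem.Dict String Int),
    ws.foldl
      (fun (st : List String × PySem.Dict String Int × Option String) word =>
        let wl := PySem.Str.lower word
        if some wl != st.2.2 then
          if PySem.Str.len wl ≤ 3 then (st.1 ++ [word], st.2.1, some wl)
          else
            let u := st.2.1.getD wl 0
            if u < 2 then (st.1 ++ [word], st.2.1.insert wl (u + 1), some wl)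
            else (st.1, st.2.1, some wl)
        else (st.1, st.2.1, some wl)) (out, usage, prev)
    = (let r := (pvDedup prev ws).foldl
        (fun (st : List String × PySem.Dict String Int) w =>
          let wl := PySem.Str.lower w
          if PySem.Str.len wl ≤ 3 then (st.1 ++ [w], st.2)
          else
            let cu := st.2.getD wl 0
            if cu < 2 then (st.1 ++ [w], st.2.insert wl (cu + 1)) else st)
        (out, usage);
       (r.1, r.2, pvLastLow prev ws)) := by
  intro ws
  induction ws with
  | nil => intro prev out usage; simp [pvDedup, pvLastLow]
  | cons w ws ih =>
    intro prev out usage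
    simp only [List.foldl_cons]
    by_cases heq : some (PySem.Str.lower w) = prev
    · have hb : (some (PySem.Str.lower w) != prev) = false := by simp [heq]
      simp only [hb, Bool.false_eq_true, if_false]
      rw [ih]
      simp [pvDedup, pvLastLow, heq]
    · have hb : (some (PySem.Str.lower w) != prev) = true := by simp [heq]
      simp only [hb, if_true]
      by_cases hlen : PySem.Str.len (PySem.Str.lower w) ≤ 3
      · have hlen' : ((PySem.Chars.lower w.toList).length ≤ 3) := by simpa using hlen
        simp only [if_pos hlen]
        rw [ih]
        simp [pvDedup, pvLastLow, heq, hlen']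
      · have hlen' : ¬ ((PySem.Chars.lower w.toList).length ≤ 3) := by simpa using hlen
        simp only [if_neg hlen]
        by_cases hu : usage.getD (PySem.Str.lower w) 0 < 2
        · have hu' : usage.getD (PySem.Str.lower w) 0 ≤ 1 := by omega
          simp only [if_pos hu]
          rw [ih]
          simp [pvDedup, pvLastLow, heq, hlen', hu']
        · have hu' : ¬ (usage.getD (PySem.Str.lower w) 0 ≤ 1) := by omega
          simp only [if_neg hu]
          rw [ih]
          simp [pvDedup, pvLastLow, heq, hlen', hu']

-- ===== VERDICT (by name: the statement is the Claim_ definition above) =====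
theorem remove_repetition_py_spec : Claim_equal_remove_repetition_py := by
  intro d _
  unfold Spec_remove_repetition_py remove_repetition_py remove_repetition_py_alt
  by_cases h : d == ""
  · simp [h]
  · simp only [h, Bool.false_eq_true, if_false]
    rw [pvFuse (PySem.Str.split₀ d) none [] PySem.Dict.empty]
    have h1 := pvEnumFold (PySem.Str.split₀ d) (PySem.Str.split₀ d) 0 [] (by simp)
    simp only [Nat.cast_zero] at h1
    rw [h1]
    simp
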